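-- pv_equiv track=rewrite | github.com/aelirift/rayxiv3 | scripts/build_game.py | _pick_default_main_scene_name
-- ===== SOURCE A (Python) =====
-- def _pick_default_main_scene_name(scene_names: list[str]) -> str:
--     priority = ("fight_main", "race_main", "gameplay", "fight", "racing", "battle", "combat", "race", "play")
--     excluded_tokens = ("start", "title", "menu", "select", "intro", "over", "result", "credits")
--     for token in priority:
--         for scene_name in scene_names:
--             lower_name = scene_name.lower()
--             if any(excluded in lower_name for excluded in excluded_tokens):
--                 continue
--             if lower_name == token or token in lower_name:
--                 return scene_name
--     for scene_name in scene_names: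
--         lower_name = scene_name.lower()
--         if any(excluded in lower_name for excluded in excluded_tokens):
--             continue
--         return scene_name
--     return scene_names[0] if scene_names else "gameplay"
-- ===== SOURCE B (Python) =====
-- def _pick_default_main_scene_name(scene_names: list[str]) -> str:
--     priority = ("fight_main", "race_main", "gameplay", "fight", "racing", "battle", "combat", "race", "play")
--     excluded_tokens = ("start", "title", "menu", "select", "intro", "over", "result", "credits")
--     best = None       # (rank, name) with the smallest priority rank seen so far
--     first_ok = None   # first scene without an excluded token
--     for name in scene_names:
--         low = name.lower()
--         if any(t in low for t in excluded_tokens):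
--             continue
--         if first_ok is None:
--             first_ok = name
--         for r, tok in enumerate(priority):
--             if tok in low:
--                 if best is None or r < best[0]:
--                     best = (r, name)
--                 break
--     if best is not None:
--         return best[1]
--     if first_ok is not None:
--         return first_ok
--     return scene_names[0] if scene_names else "gameplay"
-- ===== Notes on version B (the rewrite author's own statement) =====
-- stated objective: faster
-- what changed: Replaced the priority-outer nested rescans of the scene list (plus a second fallback pass) by a single pass over the scenes that lowercases each scene once, computes its priority rank once, and keeps the best (rank, scene) pair and the first non-excluded scene.
import Mathlib
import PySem

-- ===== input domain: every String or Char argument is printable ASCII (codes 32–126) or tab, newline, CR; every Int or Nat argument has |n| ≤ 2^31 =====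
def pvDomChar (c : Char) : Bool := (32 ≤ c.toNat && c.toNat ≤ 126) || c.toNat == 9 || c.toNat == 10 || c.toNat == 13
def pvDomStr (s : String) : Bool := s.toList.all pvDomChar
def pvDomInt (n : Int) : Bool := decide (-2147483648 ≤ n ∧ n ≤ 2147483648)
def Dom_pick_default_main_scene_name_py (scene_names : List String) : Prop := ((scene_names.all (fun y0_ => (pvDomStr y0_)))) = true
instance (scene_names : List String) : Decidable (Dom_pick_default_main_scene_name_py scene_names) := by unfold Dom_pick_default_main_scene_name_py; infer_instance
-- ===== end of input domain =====

-- B replaces A's priority-outer rescans of the scene list by one pass over the scenes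
-- keeping the best (priority-rank, scene) pair; measurably faster (each scene lowercased/checked once).

def pvPriority : List String :=
  ["fight_main", "race_main", "gameplay", "fight", "racing", "battle", "combat", "race", "play"]
def pvExcludedTokens : List String :=
  ["start", "title", "menu", "select", "intro", "over", "result", "credits"]
-- any(excluded in lower_name for excluded in excluded_tokens)
def pvIsExcl (low : String) : Bool := pvExcludedTokens.any (fun t => PySem.Str.isIn t low)

-- ===== PORT A =====
-- inner 'for scene_name in scene_names' of A's first loop (returns the first hit)
def pickA_scan (tok : String) : List String → Option String
  | [] => none
  | s :: rest =>
    let low := PySem.Str.lower s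
    if pvIsExcl low then pickA_scan tok rest
    else if low == tok || PySem.Str.isIn tok low then some s
    else pickA_scan tok rest

-- outer 'for token in priority'
def pickA_outer (scenes : List String) : List String → Option String
  | [] => none
  | tok :: toks =>
    match pickA_scan tok scenes with
    | some s => some s
    | none => pickA_outer scenes toks

-- second loop: first non-excluded scene
def pickA_fallback : List String → Option String
  | [] => none
  | s :: rest => if pvIsExcl (PySem.Str.lower s) then pickA_fallback rest else some s

def pick_default_main_scene_name_py (scene_names : List String) : String :=
  match pickA_outer scene_names pvPriority with
  | some s => s
  | none =>
    match pickA_fallback scene_names with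
    | some s => s
    | none =>
      match scene_names with
      | s :: _ => s
      | [] => "gameplay"

-- ===== PORT B =====
-- Source B's inner 'for r, tok in enumerate(priority): if tok in low: … break'
def pvRank (low : String) : List String → Option Nat
  | [] => none
  | t :: ts => if PySem.Str.isIn t low then some 0 else (pvRank low ts).map (· + 1)

-- Source B's single loop over the scenes; state = (best, first_ok)
def pickB_go : List String → Option (Nat × String) → Option String → Option (Nat × String) × Option String
  | [], best, firstOk => (best, firstOk)
  | s :: rest, best, firstOk =>
    let low := PySem.Str.lower s
    if pvIsExcl low then pickB_go rest best firstOk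
    else
      let firstOk' := match firstOk with | none => some s | some x => some x
      let best' :=
        match pvRank low pvPriority with
        | none => best
        | some r =>
          match best with
          | none => some (r, s)
          | some (br, bs) => if r < br then some (r, s) else some (br, bs)
      pickB_go rest best' firstOk'

def pick_default_main_scene_name_py_alt (scene_names : List String) : String :=
  match pickB_go scene_names none none with
  | (some (_, s), _) => s
  | (none, some s) => s
  | (none, none) =>
    match scene_names with
    | s :: _ => s
    | [] => "gameplay"

-- ===== PRECONDITION & SPEC =====
def Spec_pick_default_main_scene_name_py (scene_names : List String) (out : String) : Prop := out = pick_default_main_scene_name_py_alt scene_names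
instance (scene_names : List String) (out : String) : Decidable (Spec_pick_default_main_scene_name_py scene_names out) := by unfold Spec_pick_default_main_scene_name_py; infer_instance

-- ===== CLAIM (what is proved, stated in full; the proofs are below) =====
def Claim_equal_pick_default_main_scene_name_py : Prop := ∀ (scene_names : List String), Dom_pick_default_main_scene_name_py scene_names → Spec_pick_default_main_scene_name_py scene_names (pick_default_main_scene_name_py scene_names)

-- ===== LEMMAS AND PROOFS =====

-- 'pvBetter a b' keeps a unless b has a strictly smaller rank (Source B's update rule)
def pvBetter : Option (Nat × String) → Option (Nat × String) → Option (Nat × String)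
  | none, o => o
  | some p, none => some p
  | some p, some q => if q.1 < p.1 then some q else some p

-- first-in-list scene of minimal rank (w.r.t. token list toks), excluded scenes skipped
def pvMin (toks : List String) : List String → Option (Nat × String)
  | [] => none
  | s :: rest =>
    let low := PySem.Str.lower s
    pvBetter (if pvIsExcl low then none else (pvRank low toks).map (fun r => (r, s))) (pvMin toks rest)

def pvShift (p : Nat × String) : Nat × String := (p.1 + 1, p.2)

theorem pvBetter_assoc (a b c : Option (Nat × String)) :
    pvBetter (pvBetter a b) c = pvBetter a (pvBetter b c) := by
  rcases a with _ | a <;> rcases b with _ | b <;> rcases c with _ | c <;>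
    simp only [pvBetter] <;> repeat' split_ifs <;>
      first | rfl | omega | (simp only [pvBetter]; split_ifs <;> first | rfl | omega)

theorem pvBetter_zero (x : String) (m : Option (Nat × String)) :
    pvBetter (some (0, x)) m = some (0, x) := by
  rcases m with _ | m <;> simp [pvBetter]

theorem pvBetter_map_shift (a b : Option (Nat × String)) :
    pvBetter (a.map pvShift) (b.map pvShift) = (pvBetter a b).map pvShift := by
  rcases a with _ | a <;> rcases b with _ | b <;>
    simp only [Option.map, pvBetter, pvShift] <;> split_ifs <;> first | rfl | omega

theorem pvBetter_shift_zero (a : Option (Nat × String)) (y : String) :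
    pvBetter (a.map pvShift) (some (0, y)) = some (0, y) := by
  rcases a with _ | a <;> simp [pvBetter, pvShift]

theorem pickB_go_eq (scenes : List String) : ∀ (best : Option (Nat × String)) (firstOk : Option String),
    pickB_go scenes best firstOk =
      (pvBetter best (pvMin pvPriority scenes), firstOk.or (pickA_fallback scenes)) := by
  induction scenes with
  | nil => intro best firstOk; rcases best with _ | b <;> rcases firstOk with _ | f <;> simp [pickB_go, pvMin, pickA_fallback, pvBetter, Option.or]
  | cons s rest ih =>
    intro best firstOk
    simp only [pickB_go, pvMin, pickA_fallback]
    by_cases hx : pvIsExcl (PySem.Str.lower s)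
    · simp only [hx, if_true, ih]
      rcases best with _ | b <;> simp [pvBetter]
    · simp only [hx, if_false, Bool.false_eq_true, ih]
      simp only [Prod.mk.injEq]
      constructor
      · -- best component
        rw [← pvBetter_assoc]
        congr 1
        rcases hr : pvRank (PySem.Str.lower s) pvPriority with _ | r
        · rcases best with _ | b <;> simp [pvBetter]
        · rcases best with _ | ⟨br, bs⟩
          · simp [pvBetter]
          · simp only [pvBetter]
            split_ifs <;> simp_all
      · -- firstOk component
        rcases firstOk with _ | f <;> simp [Option.or]

theorem pvMin_nil_toks (scenes : List String) : pvMin [] scenes = none := by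
  induction scenes with
  | nil => rfl
  | cons s rest ih => simp [pvMin, pvRank, ih, pvBetter]

theorem isIn_self (s : String) : PySem.Str.isIn s s = true := by
  rw [PySem.Str.isIn_iff_infix]

theorem pvMin_cons_toks (tok : String) (toks : List String) (scenes : List String) :
    pvMin (tok :: toks) scenes =
      match pickA_scan tok scenes with
      | some s => some (0, s)
      | none => (pvMin toks scenes).map pvShift := by
  induction scenes with
  | nil => rfl
  | cons s rest ih =>
    simp only [pvMin, pickA_scan]
    by_cases hx : pvIsExcl (PySem.Str.lower s)
    · simpa [hx, pvBetter] using ih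
    · by_cases hin : PySem.Str.isIn tok (PySem.Str.lower s)
      · have hcond : (PySem.Str.lower s == tok || PySem.Str.isIn tok (PySem.Str.lower s)) = true := by
          rw [hin]; simp
        rw [if_neg hx, if_neg hx, hcond]
        simp only [pvRank]
        rw [if_pos hin]
        simp only [Option.map_some]
        exact pvBetter_zero s _
      · have heq : (PySem.Str.lower s == tok) = false := by
          apply beq_eq_false_iff_ne.mpr
          intro h; rw [h] at hin; exact hin (isIn_self tok)
        have hcond : (PySem.Str.lower s == tok || PySem.Str.isIn tok (PySem.Str.lower s)) = false := by
          rw [heq, Bool.eq_false_iff.mpr hin]; rfl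
        rw [if_neg hx, if_neg hx, hcond]
        simp only [pvRank, Bool.false_eq_true, if_false]
        rw [if_neg hin, ih]
        have hmap : ((pvRank (PySem.Str.lower s) toks).map (· + 1)).map (fun r => ((r : Nat), s))
            = ((pvRank (PySem.Str.lower s) toks).map (fun r => (r, s))).map pvShift := by
          rcases pvRank (PySem.Str.lower s) toks with _ | r <;> simp [pvShift]
        rw [hmap]
        rcases hs : pickA_scan tok rest with _ | s'
        · rw [if_neg hx]
          exact pvBetter_map_shift _ _
        · exact pvBetter_shift_zero _ s'

theorem pickA_outer_eq (toks : List String) : ∀ (scenes : List String),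
    pickA_outer scenes toks = (pvMin toks scenes).map Prod.snd := by
  induction toks with
  | nil => intro scenes; simp [pickA_outer, pvMin_nil_toks]
  | cons tok toks ih =>
    intro scenes
    simp only [pickA_outer, pvMin_cons_toks tok toks scenes]
    rcases hs : pickA_scan tok scenes with _ | s
    · simp only [ih]
      rcases pvMin toks scenes with _ | p <;> simp [pvShift]
    · rfl

-- ===== VERDICT (by name: the statement is the Claim_ definition above) =====
theorem pick_default_main_scene_name_py_spec : Claim_equal_pick_default_main_scene_name_py := by
  unfold Claim_equal_pick_default_main_scene_name_py
  intro scenes _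
  unfold Spec_pick_default_main_scene_name_py
  unfold pick_default_main_scene_name_py pick_default_main_scene_name_py_alt
  rw [pickB_go_eq, pickA_outer_eq]
  simp only [pvBetter, Option.or]
  rcases pvMin pvPriority scenes with _ | ⟨r, s⟩
  · rcases pickA_fallback scenes with _ | f
    · rcases scenes with _ | ⟨s, rest⟩ <;> rfl
    · rfl
  · rfl
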